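-- pv_equiv track=rewrite | github.com/S-Christensen/cartographersStudy | backend/scoringCards.py | stonesideForest
-- ===== SOURCE A (Python) =====
-- def dfs(grid, row, col, visited, terrain_type):
--     stack = [(row, col)]
--     cluster = []
--
--     while stack:
--         r, c = stack.pop()
--         if (r, c) not in visited and grid[r][c] == terrain_type:
--             visited.add((r, c))
--             cluster.append((r, c))
--             for dr, dc in [(1, 0), (-1, 0), (0, 1), (0, -1)]:
--                 nr, nc = r + dr, c + dc
--                 if 0 <= nr < len(grid) and 0 <= nc < len(grid[0]):
--                     stack.append((nr, nc))
--     return cluster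
--
-- def stonesideForest(grid):
--     visited = set()
--     clusters = []
--
--     for r in range(len(grid)):
--         for c in range(len(grid[0])):
--             if (r, c) not in visited and grid[r][c] == "Forest":
--                 cluster = dfs(grid, r, c, visited, "Forest")
--                 clusters.append(cluster)
--
--     allmount = set()
--     for cluster in clusters:
--         Mountains = set()
--         for r, c in cluster:
--             for dr, dc in [(1,0), (-1,0), (0,1), (0,-1)]:
--                 nr, nc = r + dr, c + dc
--                 if 0 <= nr < len(grid) and 0 <= nc < len(grid[0]) and grid[nr][nc] == "Mountain":
--                     Mountains.add((nr, nc))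
--         if len(Mountains) >= 2:
--             allmount = allmount.union(Mountains)
--
--     return len(allmount) * 3
-- ===== SOURCE B (Python) =====
-- def stonesideForest(grid):
--     H, W = len(grid), (len(grid[0]) if grid else 0)
--     label = {}
--     for r in range(H):
--         for c in range(W):
--             if grid[r][c] == "Forest":
--                 label[(r, c)] = (r, c)
--                 for nb in ((r - 1, c), (r, c - 1)):
--                     if nb in label:
--                         la, lb = label[nb], label[(r, c)]
--                         if la != lb:
--                             label = {cell: (lb if l == la else l) for cell, l in label.items()}
--     clusters = {}
--     for cell, l in label.items():
--         clusters.setdefault(l, []).append(cell)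
--     allmount = set()
--     for cluster in clusters.values():
--         mts = set()
--         for r, c in cluster:
--             for nr, nc in ((r + 1, c), (r - 1, c), (r, c + 1), (r, c - 1)):
--                 if 0 <= nr < H and 0 <= nc < W and grid[nr][nc] == "Mountain":
--                     mts.add((nr, nc))
--         if len(mts) >= 2:
--             allmount |= mts
--     return len(allmount) * 3
-- ===== Notes on version B (the rewrite author's own statement) =====
-- stated objective: alternative
-- what changed: Replaced the per-seed DFS flood-fill (explicit stack + visited set) with a single scanline pass that labels each Forest cell and merges labels with its up/left neighbours (union-by-relabel over a dict), then groups cells by final label into clusters; the scoring pass over clusters is unchanged.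
import Mathlib
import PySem

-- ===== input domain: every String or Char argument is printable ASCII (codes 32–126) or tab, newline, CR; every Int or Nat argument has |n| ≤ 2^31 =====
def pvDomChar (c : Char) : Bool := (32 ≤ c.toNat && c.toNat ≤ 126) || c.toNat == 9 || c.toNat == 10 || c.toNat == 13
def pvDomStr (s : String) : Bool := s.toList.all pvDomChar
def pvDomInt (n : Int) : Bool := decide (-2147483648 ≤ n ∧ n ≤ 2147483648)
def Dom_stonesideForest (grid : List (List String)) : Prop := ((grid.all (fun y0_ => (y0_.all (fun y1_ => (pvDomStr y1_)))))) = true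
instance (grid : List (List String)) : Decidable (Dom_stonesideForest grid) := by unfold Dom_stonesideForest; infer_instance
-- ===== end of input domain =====

-- B replaces A's DFS flood-fill with a single-pass scanline label-merging clustering (union-by-relabel
-- over a dict); same scoring pass; alternative algorithm, proved to return the same value.


-- ===== PORT A =====
-- the 4-neighbourhood [(1,0),(-1,0),(0,1),(0,-1)] applied to p, in A's iteration order
def pvNbrs (p : Int × Int) : List (Int × Int) :=
  [(p.1 + 1, p.2), (p.1 - 1, p.2), (p.1, p.2 + 1), (p.1, p.2 - 1)]

-- Python's '0 <= nr < len(grid) and 0 <= nc < len(grid[0])'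
def pvInb (grid : List (List String)) (p : Int × Int) : Bool :=
  decide (0 ≤ p.1 ∧ p.1 < (grid.length : Int) ∧ 0 ≤ p.2 ∧ p.2 < ((PySem.List.pyGetD grid 0 []).length : Int))

-- Python's 'grid[r][c]' (total via pyGetD; exact on every access both programs make inside Pre_)
def pvCell (grid : List (List String)) (p : Int × Int) : String :=
  PySem.List.pyGetD (PySem.List.pyGetD grid p.1 []) p.2 ""

-- A's 'while stack:' loop; the stack's head is its top (Python pushes/pops at the end);
-- fuel only makes the recursion structural, it never runs out on the fuel pvDfs supplies
def pvDfsLoop (grid : List (List String)) (terrain : String) :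
    Nat → List (Int × Int) → PySem.Set (Int × Int) → List (Int × Int) →
    List (Int × Int) × PySem.Set (Int × Int)
  | _, [], visited, cluster => (cluster, visited)
  | 0, _ :: _, visited, cluster => (cluster, visited)
  | fuel + 1, p :: rest, visited, cluster =>
      if PySem.Set.contains visited p = false ∧ pvCell grid p = terrain then
        pvDfsLoop grid terrain fuel
          (((pvNbrs p).filter (pvInb grid)).reverse ++ rest)
          (PySem.Set.add visited p) (cluster ++ [p])
      else
        pvDfsLoop grid terrain fuel rest visited cluster

-- Python 'dfs' (returns (cluster, visited) since the port is pure)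
def pvDfs (grid : List (List String)) (row col : Int) (visited : PySem.Set (Int × Int))
    (terrain : String) : List (Int × Int) × PySem.Set (Int × Int) :=
  pvDfsLoop grid terrain (5 * grid.length * (PySem.List.pyGetD grid 0 []).length + 1)
    [(row, col)] visited []

def stonesideForest (grid : List (List String)) : Int :=
  let scan :=
    (PySem.List.pyRange 0 (grid.length : Int)).foldl (fun acc r =>
      (PySem.List.pyRange 0 ((PySem.List.pyGetD grid 0 []).length : Int)).foldl
        (fun (acc : List (List (Int × Int)) × PySem.Set (Int × Int)) c =>
          if PySem.Set.contains acc.2 (r, c) = false ∧ pvCell grid (r, c) = "Forest" then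
            let res := pvDfs grid r c acc.2 "Forest"
            (acc.1 ++ [res.1], res.2)
          else acc) acc) ([], PySem.Set.empty)
  let allmount := scan.1.foldl (fun am cl =>
      let mts := cl.foldl (fun m p =>
          (pvNbrs p).foldl (fun m' q =>
              if pvInb grid q = true ∧ pvCell grid q = "Mountain" then PySem.Set.add m' q else m') m)
        PySem.Set.empty
      if 2 ≤ PySem.Set.len mts then PySem.Set.union am mts else am) PySem.Set.empty
  PySem.Set.len allmount * 3

-- ===== PORT B =====
-- B's '{cell: (lb if l == la else l) for cell, l in label.items()}'
def pvRelabel (la lb : Int × Int) (d : PySem.Dict (Int × Int) (Int × Int)) :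
    PySem.Dict (Int × Int) (Int × Int) :=
  PySem.Dict.mk (d.items.map (fun kv => (kv.1, if kv.2 = la then lb else kv.2)))

def stonesideForest_alt (grid : List (List String)) : Int :=
  let label :=
    (PySem.List.pyRange 0 (grid.length : Int)).foldl (fun lab r =>
      (PySem.List.pyRange 0 ((PySem.List.pyGetD grid 0 []).length : Int)).foldl
        (fun (lab : PySem.Dict (Int × Int) (Int × Int)) c =>
          if pvCell grid (r, c) = "Forest" then
            [(r - 1, c), (r, c - 1)].foldl (fun lab2 nb =>
              match lab2.get? nb with
              | some la =>
                  let lb := lab2.getD (r, c) (r, c)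
                  if la ≠ lb then pvRelabel la lb lab2 else lab2
              | none => lab2) (lab.insert (r, c) (r, c))
          else lab) lab) PySem.Dict.empty
  let clusters := label.items.foldl
      (fun (cd : PySem.Dict (Int × Int) (List (Int × Int))) kv =>
        cd.insert kv.2 (cd.getD kv.2 [] ++ [kv.1])) PySem.Dict.empty
  let allmount := clusters.values.foldl (fun am cl =>
      let mts := cl.foldl (fun m p =>
          (pvNbrs p).foldl (fun m' q =>
              if pvInb grid q = true ∧ pvCell grid q = "Mountain" then PySem.Set.add m' q else m') m)
        PySem.Set.empty
      if 2 ≤ PySem.Set.len mts then PySem.Set.union am mts else am) PySem.Set.empty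
  PySem.Set.len allmount * 3

-- ===== PRECONDITION & SPEC =====
-- Pre_ excludes exactly the inputs where Python A raises IndexError: ragged grids in which
-- some row is shorter than row 0 (grid[r][c] is read for every c < len(grid[0])).
def Pre_stonesideForest (grid : List (List String)) : Prop :=
  ∀ row ∈ grid, (grid.headD []).length ≤ row.length
instance (grid : List (List String)) : Decidable (Pre_stonesideForest grid) := by
  unfold Pre_stonesideForest; infer_instance

def pvWitness_stonesideForest : List (List String) :=
  [["Forest", "Mountain"], ["Mountain", "Plain"]]

def Spec_stonesideForest (grid : List (List String)) (out : Int) : Prop := out = stonesideForest_alt grid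
instance (grid : List (List String)) (out : Int) : Decidable (Spec_stonesideForest grid out) := by unfold Spec_stonesideForest; infer_instance

-- ===== CLAIM (what is proved, stated in full; the proofs are below) =====
def Claim_equal_stonesideForest : Prop := ∀ (grid : List (List String)), Dom_stonesideForest grid → Pre_stonesideForest grid → Spec_stonesideForest grid (stonesideForest grid)

-- ===== LEMMAS AND PROOFS =====

-- cell predicates, terrain-generic ('t' is "Forest" for clustering, "Mountain" for scoring)
def pvTc (g : List (List String)) (t : String) (p : Int × Int) : Prop :=
  pvInb g p = true ∧ pvCell g p = t

def pvStepT (g : List (List String)) (t : String) (p q : Int × Int) : Prop :=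
  pvTc g t p ∧ pvTc g t q ∧ q ∈ pvNbrs p

def pvReachT (g : List (List String)) (t : String) : (Int × Int) → (Int × Int) → Prop :=
  Relation.ReflTransGen (pvStepT g t)

-- the scoring pass, as a function of the cluster family
def pvMts (g : List (List String)) (cl : List (Int × Int)) : PySem.Set (Int × Int) :=
  cl.foldl (fun m p =>
      (pvNbrs p).foldl (fun m' q =>
          if pvInb g q = true ∧ pvCell g q = "Mountain" then PySem.Set.add m' q else m') m)
    PySem.Set.empty

def pvAllm (g : List (List String)) (fam : List (List (Int × Int))) : PySem.Set (Int × Int) :=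
  fam.foldl (fun am cl =>
      if 2 ≤ PySem.Set.len (pvMts g cl) then PySem.Set.union am (pvMts g cl) else am) PySem.Set.empty

-- a family of clusters that is exactly the forest components
def pvGoodFam (g : List (List String)) (fam : List (List (Int × Int))) : Prop :=
  (∀ cl ∈ fam, ∃ f, pvTc g "Forest" f ∧ ∀ x, x ∈ cl ↔ (pvTc g "Forest" x ∧ pvReachT g "Forest" f x)) ∧
  (∀ x, pvTc g "Forest" x → ∃ cl ∈ fam, x ∈ cl)

-- all in-bounds cells in scan order
def pvCells (g : List (List String)) : List (Int × Int) :=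
  (PySem.List.pyRange 0 (g.length : Int)).flatMap (fun r =>
    (PySem.List.pyRange 0 ((PySem.List.pyGetD g 0 []).length : Int)).map (fun c => (r, c)))

-- A's scan, named
def pvScanA (g : List (List String)) : List (List (Int × Int)) × PySem.Set (Int × Int) :=
  (PySem.List.pyRange 0 (g.length : Int)).foldl (fun acc r =>
    (PySem.List.pyRange 0 ((PySem.List.pyGetD g 0 []).length : Int)).foldl
      (fun (acc : List (List (Int × Int)) × PySem.Set (Int × Int)) c =>
        if PySem.Set.contains acc.2 (r, c) = false ∧ pvCell g (r, c) = "Forest" then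
          (acc.1 ++ [(pvDfs g r c acc.2 "Forest").1], (pvDfs g r c acc.2 "Forest").2)
        else acc) acc) ([], PySem.Set.empty)

def pvStepA (g : List (List String)) (acc : List (List (Int × Int)) × PySem.Set (Int × Int))
    (p : Int × Int) : List (List (Int × Int)) × PySem.Set (Int × Int) :=
  if PySem.Set.contains acc.2 p = false ∧ pvCell g p = "Forest" then
    (acc.1 ++ [(pvDfs g p.1 p.2 acc.2 "Forest").1], (pvDfs g p.1 p.2 acc.2 "Forest").2)
  else acc

-- B's label scan, named
def pvStepB (g : List (List String)) (lab : PySem.Dict (Int × Int) (Int × Int)) (p : Int × Int) :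
    PySem.Dict (Int × Int) (Int × Int) :=
  if pvCell g p = "Forest" then
    [(p.1 - 1, p.2), (p.1, p.2 - 1)].foldl (fun lab2 nb =>
      match lab2.get? nb with
      | some la =>
          let lb := lab2.getD p p
          if la ≠ lb then pvRelabel la lb lab2 else lab2
      | none => lab2) (lab.insert p p)
  else lab

def pvScanB (g : List (List String)) : PySem.Dict (Int × Int) (Int × Int) :=
  (PySem.List.pyRange 0 (g.length : Int)).foldl (fun lab r =>
    (PySem.List.pyRange 0 ((PySem.List.pyGetD g 0 []).length : Int)).foldl
      (fun (lab : PySem.Dict (Int × Int) (Int × Int)) c =>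
        if pvCell g (r, c) = "Forest" then
          [(r - 1, c), (r, c - 1)].foldl (fun lab2 nb =>
            match lab2.get? nb with
            | some la =>
                let lb := lab2.getD (r, c) (r, c)
                if la ≠ lb then pvRelabel la lb lab2 else lab2
            | none => lab2) (lab.insert (r, c) (r, c))
        else lab) lab) PySem.Dict.empty

def pvClustersB (g : List (List String)) : PySem.Dict (Int × Int) (List (Int × Int)) :=
  (pvScanB g).items.foldl
    (fun (cd : PySem.Dict (Int × Int) (List (Int × Int))) kv =>
      cd.insert kv.2 (cd.getD kv.2 [] ++ [kv.1])) PySem.Dict.empty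

lemma portA_eq (g : List (List String)) :
    stonesideForest g = PySem.Set.len (pvAllm g (pvScanA g).1) * 3 := rfl

lemma portB_eq (g : List (List String)) :
    stonesideForest_alt g = PySem.Set.len (pvAllm g (pvClustersB g).values) * 3 := rfl


lemma mem_nbrs_symm {p q : Int × Int} (h : q ∈ pvNbrs p) : p ∈ pvNbrs q := by
  simp only [pvNbrs, List.mem_cons, List.not_mem_nil, or_false, Prod.ext_iff] at h ⊢
  obtain ⟨h1, h2⟩ | ⟨h1, h2⟩ | ⟨h1, h2⟩ | ⟨h1, h2⟩ := h <;> omega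

lemma stepT_symm (g : List (List String)) (t : String) : Symmetric (pvStepT g t) := by
  intro a b ⟨ha, hb, hn⟩; exact ⟨hb, ha, mem_nbrs_symm hn⟩

lemma reachT_symm {g : List (List String)} {t : String} {p q : Int × Int}
    (h : pvReachT g t p q) : pvReachT g t q p :=
  Relation.ReflTransGen.symmetric (stepT_symm g t) h

lemma mem_addIf_fold (g : List (List String)) (l : List (Int × Int))
    (acc : PySem.Set (Int × Int)) (x : Int × Int) :
    x ∈ l.foldl (fun m' q =>
        if pvInb g q = true ∧ pvCell g q = "Mountain" then PySem.Set.add m' q else m') acc ↔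
      x ∈ acc ∨ (x ∈ l ∧ pvTc g "Mountain" x) := by
  induction l generalizing acc with
  | nil => simp
  | cons q rest ih =>
    simp only [List.foldl_cons, ih, List.mem_cons]
    split
    · rename_i hq
      rw [PySem.Set.mem_add]
      constructor
      · rintro ((h | rfl) | h)
        · exact Or.inl h
        · exact Or.inr ⟨Or.inl rfl, hq⟩
        · exact Or.inr ⟨Or.inr h.1, h.2⟩
      · rintro (h | ⟨(rfl | h), hx⟩)
        · exact Or.inl (Or.inl h)
        · exact Or.inl (Or.inr rfl)
        · exact Or.inr ⟨h, hx⟩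
    · rename_i hq
      constructor
      · rintro (h | h)
        · exact Or.inl h
        · exact Or.inr ⟨Or.inr h.1, h.2⟩
      · rintro (h | ⟨(rfl | h), hx⟩)
        · exact Or.inl h
        · exact absurd hx hq
        · exact Or.inr ⟨h, hx⟩

lemma nodup_addIf_fold (g : List (List String)) (l : List (Int × Int))
    (acc : PySem.Set (Int × Int)) (h : acc.Nodup) :
    (l.foldl (fun m' q =>
        if pvInb g q = true ∧ pvCell g q = "Mountain" then PySem.Set.add m' q else m') acc).Nodup := by
  induction l generalizing acc with
  | nil => exact h
  | cons q rest ih =>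
    simp only [List.foldl_cons]
    apply ih
    split
    · exact PySem.Set.nodup_add _ _ h
    · exact h

lemma mem_mts (g : List (List String)) (cl : List (Int × Int)) (x : Int × Int) :
    x ∈ pvMts g cl ↔ ∃ p ∈ cl, x ∈ pvNbrs p ∧ pvTc g "Mountain" x := by
  unfold pvMts
  have aux : ∀ (cl : List (Int × Int)) (acc : PySem.Set (Int × Int)),
      x ∈ cl.foldl (fun m p =>
          (pvNbrs p).foldl (fun m' q =>
              if pvInb g q = true ∧ pvCell g q = "Mountain" then PySem.Set.add m' q else m') m) acc ↔
        x ∈ acc ∨ ∃ p ∈ cl, x ∈ pvNbrs p ∧ pvTc g "Mountain" x := by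
    intro cl
    induction cl with
    | nil => simp
    | cons p rest ih =>
      intro acc
      simp only [List.foldl_cons, ih, mem_addIf_fold, List.mem_cons]
      constructor
      · rintro ((h | h) | ⟨p', hp', h⟩)
        · exact Or.inl h
        · exact Or.inr ⟨p, Or.inl rfl, h⟩
        · exact Or.inr ⟨p', Or.inr hp', h⟩
      · rintro (h | ⟨p', (rfl | hp'), h⟩)
        · exact Or.inl (Or.inl h)
        · exact Or.inl (Or.inr h)
        · exact Or.inr ⟨p', hp', h⟩
  rw [aux]; simp

lemma nodup_mts (g : List (List String)) (cl : List (Int × Int)) : (pvMts g cl).Nodup := by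
  unfold pvMts
  have aux : ∀ (cl : List (Int × Int)) (acc : PySem.Set (Int × Int)), acc.Nodup →
      (cl.foldl (fun m p =>
          (pvNbrs p).foldl (fun m' q =>
              if pvInb g q = true ∧ pvCell g q = "Mountain" then PySem.Set.add m' q else m') m) acc).Nodup := by
    intro cl
    induction cl with
    | nil => exact fun _ h => h
    | cons p rest ih => exact fun acc h => ih _ (nodup_addIf_fold g _ _ h)
  exact aux cl _ List.nodup_nil

lemma mem_allm (g : List (List String)) (fam : List (List (Int × Int))) (x : Int × Int) :
    x ∈ pvAllm g fam ↔ ∃ cl ∈ fam, 2 ≤ PySem.Set.len (pvMts g cl) ∧ x ∈ pvMts g cl := by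
  unfold pvAllm
  have aux : ∀ (fam : List (List (Int × Int))) (acc : PySem.Set (Int × Int)),
      x ∈ fam.foldl (fun am cl =>
          if 2 ≤ PySem.Set.len (pvMts g cl) then PySem.Set.union am (pvMts g cl) else am) acc ↔
        x ∈ acc ∨ ∃ cl ∈ fam, 2 ≤ PySem.Set.len (pvMts g cl) ∧ x ∈ pvMts g cl := by
    intro fam
    induction fam with
    | nil => simp
    | cons cl rest ih =>
      intro acc
      simp only [List.foldl_cons, ih, List.mem_cons]
      split
      · rename_i hcl
        rw [PySem.Set.mem_union]
        constructor
        · rintro ((h | h) | ⟨cl', hcl', h⟩)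
          · exact Or.inl h
          · exact Or.inr ⟨cl, Or.inl rfl, hcl, h⟩
          · exact Or.inr ⟨cl', Or.inr hcl', h⟩
        · rintro (h | ⟨cl', (rfl | hcl'), h2, h⟩)
          · exact Or.inl (Or.inl h)
          · exact Or.inl (Or.inr h)
          · exact Or.inr ⟨cl', hcl', h2, h⟩
      · rename_i hcl
        constructor
        · rintro (h | ⟨cl', hcl', h⟩)
          · exact Or.inl h
          · exact Or.inr ⟨cl', Or.inr hcl', h⟩
        · rintro (h | ⟨cl', (rfl | hcl'), h2, h⟩)
          · exact Or.inl h
          · exact absurd h2 hcl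
          · exact Or.inr ⟨cl', hcl', h2, h⟩
  rw [aux]; simp

lemma nodup_allm (g : List (List String)) (fam : List (List (Int × Int))) : (pvAllm g fam).Nodup := by
  unfold pvAllm
  have aux : ∀ (fam : List (List (Int × Int))) (acc : PySem.Set (Int × Int)), acc.Nodup →
      (fam.foldl (fun am cl =>
          if 2 ≤ PySem.Set.len (pvMts g cl) then PySem.Set.union am (pvMts g cl) else am) acc).Nodup := by
    intro fam
    induction fam with
    | nil => exact fun _ h => h
    | cons cl rest ih =>
      intro acc h
      simp only [List.foldl_cons]
      apply ih
      split
      · exact PySem.Set.nodup_union _ _ h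
      · exact h
  exact aux fam _ List.nodup_nil

lemma len_eq_of_mem_iff {l1 l2 : List (Int × Int)} (h1 : l1.Nodup) (h2 : l2.Nodup)
    (h : ∀ x, x ∈ l1 ↔ x ∈ l2) : l1.length = l2.length :=
  ((List.perm_ext_iff_of_nodup h1 h2).2 h).length_eq

lemma sameMembers_of_goodFams {g : List (List String)} {f1 f2 : List (List (Int × Int))}
    (h1 : pvGoodFam g f1) (h2 : pvGoodFam g f2) {cl : List (Int × Int)} (hcl : cl ∈ f1) :
    ∃ cl' ∈ f2, ∀ x, x ∈ cl ↔ x ∈ cl' := by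
  obtain ⟨f, hf, hiff⟩ := h1.1 cl hcl
  have hfcl : f ∈ cl := (hiff f).2 ⟨hf, Relation.ReflTransGen.refl⟩
  obtain ⟨cl', hcl', hfcl'⟩ := h2.2 f hf
  obtain ⟨f', hf', hiff'⟩ := h2.1 cl' hcl'
  have hreach' : pvReachT g "Forest" f' f := ((hiff' f).1 hfcl').2
  refine ⟨cl', hcl', fun x => ?_⟩
  rw [hiff, hiff']
  constructor
  · rintro ⟨hx, hr⟩; exact ⟨hx, hreach'.trans hr⟩
  · rintro ⟨hx, hr⟩; exact ⟨hx, (reachT_symm hreach').trans hr⟩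

lemma mem_allm_mono {g : List (List String)} {f1 f2 : List (List (Int × Int))}
    (h1 : pvGoodFam g f1) (h2 : pvGoodFam g f2) (x : Int × Int)
    (hx : x ∈ pvAllm g f1) : x ∈ pvAllm g f2 := by
  rw [mem_allm] at hx ⊢
  obtain ⟨cl, hcl, hlen, hmem⟩ := hx
  obtain ⟨cl', hcl', hsame⟩ := sameMembers_of_goodFams h1 h2 hcl
  have hmts : ∀ y, y ∈ pvMts g cl ↔ y ∈ pvMts g cl' := by
    intro y
    rw [mem_mts, mem_mts]
    constructor
    · rintro ⟨p, hp, h⟩; exact ⟨p, (hsame p).1 hp, h⟩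
    · rintro ⟨p, hp, h⟩; exact ⟨p, (hsame p).2 hp, h⟩
  have hlen' : PySem.Set.len (pvMts g cl) = PySem.Set.len (pvMts g cl') := by
    rw [PySem.Set.len_eq, PySem.Set.len_eq]
    exact_mod_cast len_eq_of_mem_iff (nodup_mts g cl) (nodup_mts g cl') hmts
  exact ⟨cl', hcl', hlen' ▸ hlen, (hmts x).1 hmem⟩

lemma allm_len_congr (g : List (List String)) (f1 f2 : List (List (Int × Int)))
    (h1 : pvGoodFam g f1) (h2 : pvGoodFam g f2) :
    PySem.Set.len (pvAllm g f1) = PySem.Set.len (pvAllm g f2) := by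
  rw [PySem.Set.len_eq, PySem.Set.len_eq]
  exact_mod_cast len_eq_of_mem_iff (nodup_allm g f1) (nodup_allm g f2)
    (fun x => ⟨mem_allm_mono h1 h2 x, mem_allm_mono h2 h1 x⟩)

lemma mem_cells (g : List (List String)) (p : Int × Int) :
    p ∈ pvCells g ↔ pvInb g p = true := by
  unfold pvCells pvInb
  simp only [List.mem_flatMap, List.mem_map, PySem.List.mem_pyRange_one, decide_eq_true_eq]
  constructor
  · rintro ⟨r, hr, c, hc, rfl⟩
    exact ⟨hr.1, hr.2, hc.1, hc.2⟩
  · rintro ⟨h1, h2, h3, h4⟩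
    exact ⟨p.1, ⟨h1, h2⟩, p.2, ⟨h3, h4⟩, rfl⟩

def pvLex (a b : Int × Int) : Prop := a.1 < b.1 ∨ (a.1 = b.1 ∧ a.2 < b.2)

lemma pyRange_pairwise_lt (n : Nat) : (PySem.List.pyRange 0 (n : Int) 1).Pairwise (· < ·) := by
  rw [PySem.List.pyRange_zero_natCast]
  exact (List.pairwise_lt_range).map _ (by intro a b h; exact_mod_cast h)

lemma pairwise_lex_cells (g : List (List String)) : (pvCells g).Pairwise pvLex := by
  unfold pvCells
  rw [List.pairwise_flatMap]
  constructor
  · intro r _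
    rw [List.pairwise_map]
    refine (pyRange_pairwise_lt _).imp ?_
    intro c c' h
    exact Or.inr ⟨rfl, h⟩
  · refine (pyRange_pairwise_lt _).imp ?_
    intro r r' h x hx y hy
    simp only [List.mem_map] at hx hy
    obtain ⟨c, _, rfl⟩ := hx
    obtain ⟨c', _, rfl⟩ := hy
    exact Or.inl h

lemma nodup_cells (g : List (List String)) : (pvCells g).Nodup :=
  (pairwise_lex_cells g).imp (by intro a b h heq; subst heq; exact absurd h (by simp [pvLex]))

lemma length_cells (g : List (List String)) :
    (pvCells g).length = g.length * (PySem.List.pyGetD g 0 []).length := by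
  unfold pvCells
  rw [List.length_flatMap]
  have hlen : ∀ r : Int, ((PySem.List.pyRange 0 ((PySem.List.pyGetD g 0 []).length : Int) 1).map
      (fun c => (r, c))).length = (PySem.List.pyGetD g 0 []).length := by
    intro r
    rw [List.length_map, PySem.List.pyRange_zero_natCast, List.length_map, List.length_range]
  simp only [hlen]
  rw [List.map_const', List.sum_replicate, smul_eq_mul, PySem.List.pyRange_zero_natCast,
    List.length_map, List.length_range]

lemma filter_count_drop {g : List (List String)} {V : List (Int × Int)} {p : Int × Int}
    (hp : p ∈ pvCells g) (hpV : p ∉ V) :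
    ((pvCells g).filter (fun x => decide (x ∉ V ++ [p]))).length + 1 =
      ((pvCells g).filter (fun x => decide (x ∉ V))).length := by
  have h1 : (pvCells g).filter (fun x => decide (x ∉ V ++ [p])) =
      ((pvCells g).filter (fun x => decide (x ∉ V))).filter (fun x => x != p) := by
    rw [List.filter_filter]
    apply List.filter_congr
    intro x _
    simp [List.mem_append, not_or, Bool.and_comm, bne, beq_eq_decide]
  have hmem : p ∈ (pvCells g).filter (fun x => decide (x ∉ V)) :=
    List.mem_filter.2 ⟨hp, by simpa using hpV⟩
  have hnd : ((pvCells g).filter (fun x => decide (x ∉ V))).Nodup :=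
    (nodup_cells g).filter _
  rw [h1, ← hnd.erase_eq_filter p, List.length_erase_of_mem hmem]
  have := List.length_pos_of_mem hmem
  omega

lemma invA_len_bound (g : List (List String)) (V : List (Int × Int)) :
    ((pvCells g).filter (fun x => decide (x ∉ V))).length ≤
      g.length * (PySem.List.pyGetD g 0 []).length := by
  rw [← length_cells g]
  exact List.length_filter_le _ _

lemma dfsLoop_spec (g : List (List String)) (t : String) :
    ∀ (fuel : Nat) (S : List (Int × Int)) (V : PySem.Set (Int × Int)) (C : List (Int × Int)),
    5 * ((pvCells g).filter (fun x => decide (x ∉ V))).length + S.length ≤ fuel →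
    (∀ s ∈ S, pvInb g s = true) →
    V.Nodup →
    (∀ x y, x ∈ V → pvStepT g t x y → y ∈ V ∨ y ∈ S) →
    ∃ Δ, pvDfsLoop g t fuel S V C = (C ++ Δ, V ++ Δ) ∧
      (V ++ Δ).Nodup ∧
      (∀ x ∈ Δ, pvTc g t x ∧ x ∉ V ∧ ∃ s ∈ S, pvReachT g t s x) ∧
      (∀ x, pvTc g t x → x ∉ V → (∃ s ∈ S, pvReachT g t s x) → x ∈ Δ) := by
  intro fuel
  induction fuel with
  | zero =>
    intro S V C hmu hS hV hCL
    cases S with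
    | nil =>
      exact ⟨[], by simp [pvDfsLoop], by simpa using hV, by simp,
        by rintro x _ _ ⟨s, hs, _⟩; cases hs⟩
    | cons p rest => simp at hmu
  | succ fuel ih =>
    intro S V C hmu hS hV hCL
    cases S with
    | nil =>
      exact ⟨[], by simp [pvDfsLoop], by simpa using hV, by simp,
        by rintro x _ _ ⟨s, hs, _⟩; cases hs⟩
    | cons p rest =>
      simp only [pvDfsLoop]
      by_cases hcond : PySem.Set.contains V p = false ∧ pvCell g p = t
      · rw [if_pos hcond]
        have hpV : p ∉ V := by
          intro h
          rw [← PySem.Set.contains_iff V p] at h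
          rw [hcond.1] at h
          cases h
        have hpinb : pvInb g p = true := hS p (List.mem_cons_self)
        have hTp : pvTc g t p := ⟨hpinb, hcond.2⟩
        have hadd : PySem.Set.add V p = V ++ [p] := PySem.Set.add_of_not_mem hpV
        rw [hadd]
        have hmemp : ∀ q, q ∈ ((pvNbrs p).filter (pvInb g)).reverse ↔
            (q ∈ pvNbrs p ∧ pvInb g q = true) := by
          intro q; rw [List.mem_reverse, List.mem_filter]
        obtain ⟨Δ, heq, hnodup, hsound, hcomp⟩ :=
          ih (((pvNbrs p).filter (pvInb g)).reverse ++ rest) (V ++ [p]) (C ++ [p])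
            (by
              have hcnt := filter_count_drop (p := p) ((mem_cells g p).2 hpinb) hpV
              have hplen : (((pvNbrs p).filter (pvInb g)).reverse).length ≤ 4 := by
                rw [List.length_reverse]
                have := List.length_filter_le (pvInb g) (pvNbrs p)
                simpa [pvNbrs] using this
              simp only [List.length_append, List.length_cons] at hmu ⊢
              omega)
            (by
              intro s hs
              rcases List.mem_append.1 hs with hs | hs
              · exact ((hmemp s).1 hs).2
              · exact hS s (List.mem_cons_of_mem _ hs))
            (by
              rw [List.nodup_append]
              refine ⟨hV, List.nodup_singleton p, ?_⟩
              intro a ha b hb heq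
              subst heq
              exact hpV (List.mem_singleton.1 hb ▸ ha))
            (by
              intro x y hx hstep
              rcases List.mem_append.1 hx with hx | hx
              · rcases hCL x y hx hstep with hy | hy
                · exact Or.inl (List.mem_append.2 (Or.inl hy))
                · rcases List.mem_cons.1 hy with hyp | hy
                  · exact Or.inl (List.mem_append.2 (Or.inr (List.mem_singleton.2 hyp)))
                  · exact Or.inr (List.mem_append.2 (Or.inr hy))
              · have hxp : x = p := List.mem_singleton.1 hx
                rw [hxp] at hstep
                have hy : y ∈ ((pvNbrs p).filter (pvInb g)).reverse :=
                  (hmemp y).2 ⟨hstep.2.2, hstep.2.1.1⟩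
                exact Or.inr (List.mem_append.2 (Or.inl hy)))
        refine ⟨p :: Δ, ?_, ?_, ?_, ?_⟩
        · rw [heq]; simp
        · simpa using hnodup
        · intro x hxmem
          rcases List.mem_cons.1 hxmem with hxp | hx
          · rw [hxp]
            exact ⟨hTp, hpV, p, List.mem_cons_self, Relation.ReflTransGen.refl⟩
          · obtain ⟨hT, hxV, s, hs, hr⟩ := hsound x hx
            have hxV' : x ∉ V := fun h => hxV (List.mem_append.2 (Or.inl h))
            refine ⟨hT, hxV', ?_⟩
            rcases List.mem_append.1 hs with hs | hs
            · have hTs : pvTc g t s := by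
                rcases hr.cases_head with rfl | ⟨c, hstep, _⟩
                · exact hT
                · exact hstep.1
              have hstep : pvStepT g t p s := ⟨hTp, hTs, ((hmemp s).1 hs).1⟩
              exact ⟨p, List.mem_cons_self, Relation.ReflTransGen.head hstep hr⟩
            · exact ⟨s, List.mem_cons_of_mem _ hs, hr⟩
        · intro x hT hxV hex
          by_cases hxp : x = p
          · exact hxp ▸ List.mem_cons_self
          · refine List.mem_cons_of_mem _ (hcomp x hT ?_ ?_)
            · intro h
              rcases List.mem_append.1 h with h | h
              · exact hxV h
              · exact hxp (List.mem_singleton.1 h)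
            · obtain ⟨s, hs, hr⟩ := hex
              rcases List.mem_cons.1 hs with hsp | hs
              · rw [hsp] at hr
                rcases hr.cases_head with hpx | ⟨c, hstep, hr'⟩
                · exact absurd hpx.symm hxp
                · have hc : c ∈ ((pvNbrs p).filter (pvInb g)).reverse :=
                    (hmemp c).2 ⟨hstep.2.2, hstep.2.1.1⟩
                  exact ⟨c, List.mem_append.2 (Or.inl hc), hr'⟩
              · exact ⟨s, List.mem_append.2 (Or.inr hs), hr⟩
      · rw [if_neg hcond]
        have hcond' : p ∈ V ∨ pvCell g p ≠ t := by
          by_cases h1 : p ∈ V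
          · exact Or.inl h1
          · refine Or.inr ?_
            intro h2
            exact hcond ⟨by
              cases hb : PySem.Set.contains V p
              · rfl
              · exact absurd ((PySem.Set.contains_iff V p).1 hb) h1, h2⟩
        obtain ⟨Δ, heq, hnodup, hsound, hcomp⟩ :=
          ih rest V C
            (by simp only [List.length_cons] at hmu; omega)
            (fun s hs => hS s (List.mem_cons_of_mem _ hs)) hV
            (by
              intro x y hx hstep
              rcases hCL x y hx hstep with hy | hy
              · exact Or.inl hy
              · rcases List.mem_cons.1 hy with hyp | hy
                · rw [hyp] at hstep ⊢
                  rcases hcond' with h | h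
                  · exact Or.inl h
                  · exact absurd hstep.2.1.2 h
                · exact Or.inr hy)
        refine ⟨Δ, heq, hnodup, ?_, ?_⟩
        · intro x hx
          obtain ⟨hT, hxV, s, hs, hr⟩ := hsound x hx
          exact ⟨hT, hxV, s, List.mem_cons_of_mem _ hs, hr⟩
        · intro x hT hxV hex
          obtain ⟨s, hs, hr⟩ := hex
          rcases List.mem_cons.1 hs with hsp | hs
          · rw [hsp] at hr
            rcases hcond' with hsV | hcell
            · -- escape lemma: the path from s ∈ V must exit V through the remaining stack
              have hesc : ∀ a, pvReachT g t a x → a ∈ V → ∃ s' ∈ rest, pvReachT g t s' x := by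
                intro a hr
                induction hr using Relation.ReflTransGen.head_induction_on with
                | refl => exact fun haV => absurd haV hxV
                | head hstep hr ihm =>
                  rename_i a c
                  intro haV
                  rcases hCL _ _ haV hstep with hc | hc
                  · exact ihm hc
                  · rcases List.mem_cons.1 hc with rfl | hc
                    · exact ihm hsV
                    · exact ⟨c, hc, hr⟩
              obtain ⟨s', hs', hr'⟩ := hesc p hr hsV
              exact hcomp x hT hxV ⟨s', hs', hr'⟩
            · rcases hr.cases_head with hpx | ⟨c, hstep, _⟩
              · exact absurd (show pvCell g p = t by rw [hpx]; exact hT.2) hcell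
              · exact absurd hstep.1.2 hcell
          · exact hcomp x hT hxV ⟨s, hs, hr⟩

lemma scanA_eq (g : List (List String)) :
    pvScanA g = (pvCells g).foldl (pvStepA g) ([], PySem.Set.empty) := by
  unfold pvScanA pvCells pvStepA
  rw [List.foldl_flatMap]
  simp only [List.foldl_map]

def pvInvA (g : List (List String)) (st : List (List (Int × Int)) × PySem.Set (Int × Int)) : Prop :=
  (∀ cl ∈ st.1, ∃ f, pvTc g "Forest" f ∧
    ∀ x, x ∈ cl ↔ (pvTc g "Forest" x ∧ pvReachT g "Forest" f x)) ∧
  (∀ x, x ∈ st.2 ↔ ∃ cl ∈ st.1, x ∈ cl) ∧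
  st.2.Nodup

lemma invA_closed {g : List (List String)} {st} (h : pvInvA g st) {x y : Int × Int}
    (hx : x ∈ st.2) (hst : pvStepT g "Forest" x y) : y ∈ st.2 := by
  obtain ⟨cl, hcl, hxcl⟩ := (h.2.1 x).1 hx
  obtain ⟨f, hf, hiff⟩ := h.1 cl hcl
  have hx' := (hiff x).1 hxcl
  have hy : y ∈ cl := (hiff y).2 ⟨hst.2.1, hx'.2.trans (Relation.ReflTransGen.single hst)⟩
  exact (h.2.1 y).2 ⟨cl, hcl, hy⟩

lemma scanA_fold (g : List (List String)) : ∀ (cells : List (Int × Int)) st,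
    (∀ p ∈ cells, pvInb g p = true) → pvInvA g st →
    pvInvA g (cells.foldl (pvStepA g) st) ∧
    (∀ x ∈ st.2, x ∈ (cells.foldl (pvStepA g) st).2) ∧
    (∀ p ∈ cells, pvCell g p = "Forest" → p ∈ (cells.foldl (pvStepA g) st).2) := by
  intro cells
  induction cells with
  | nil => exact fun st _ h => ⟨h, fun x hx => hx, by simp⟩
  | cons p rest ihc =>
    intro st hc hinv
    simp only [List.foldl_cons]
    have hpinb : pvInb g p = true := hc p List.mem_cons_self
    by_cases hcond : PySem.Set.contains st.2 p = false ∧ pvCell g p = "Forest"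
    · have hpV : p ∉ st.2 := by
        intro h
        rw [← PySem.Set.contains_iff st.2 p] at h
        rw [hcond.1] at h
        cases h
      obtain ⟨Δ, heq, hnodup, hsound, hcomp⟩ :=
        dfsLoop_spec g "Forest" (5 * g.length * (PySem.List.pyGetD g 0 []).length + 1)
          [p] st.2 []
          (by
            have hb := invA_len_bound g st.2
            have h5 : 5 * ((pvCells g).filter (fun x => decide (x ∉ st.2))).length ≤
                5 * (g.length * (PySem.List.pyGetD g 0 []).length) :=
              Nat.mul_le_mul_left 5 hb
            simp only [List.length_singleton]
            rw [Nat.mul_assoc]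
            omega)
          (by intro s hs; rw [List.mem_singleton.1 hs]; exact hpinb)
          hinv.2.2
          (by
            intro x y hx hst
            exact Or.inl (invA_closed hinv hx hst))
      have hstep : pvStepA g st p = (st.1 ++ [Δ], st.2 ++ Δ) := by
        unfold pvStepA pvDfs
        rw [if_pos hcond]
        have hpp : ((p.1 : Int), (p.2 : Int)) = p := rfl
        rw [hpp, heq]
        simp
      have hΔ : ∀ x, x ∈ Δ ↔ (pvTc g "Forest" x ∧ pvReachT g "Forest" p x) := by
        intro x
        constructor
        · intro hx
          obtain ⟨hT, _, s, hs, hr⟩ := hsound x hx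
          rw [List.mem_singleton.1 hs] at hr
          exact ⟨hT, hr⟩
        · rintro ⟨hT, hr⟩
          refine hcomp x hT ?_ ⟨p, List.mem_singleton.2 rfl, hr⟩
          intro hxV
          obtain ⟨cl, hcl, hxcl⟩ := (hinv.2.1 x).1 hxV
          obtain ⟨f, hf, hiff⟩ := hinv.1 cl hcl
          have hx' := (hiff x).1 hxcl
          have hTp : pvTc g "Forest" p := ⟨hpinb, hcond.2⟩
          have hfp : pvReachT g "Forest" f p := hx'.2.trans (reachT_symm hr)
          exact hpV ((hinv.2.1 p).2 ⟨cl, hcl, (hiff p).2 ⟨hTp, hfp⟩⟩)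
      have hinv' : pvInvA g (st.1 ++ [Δ], st.2 ++ Δ) := by
        refine ⟨?_, ?_, hnodup⟩
        · intro cl hcl
          rcases List.mem_append.1 hcl with hcl | hcl
          · exact hinv.1 cl hcl
          · rw [List.mem_singleton.1 hcl]
            exact ⟨p, ⟨hpinb, hcond.2⟩, hΔ⟩
        · intro x
          simp only [List.mem_append]
          constructor
          · rintro (hx | hx)
            · obtain ⟨cl, hcl, hxcl⟩ := (hinv.2.1 x).1 hx
              exact ⟨cl, Or.inl hcl, hxcl⟩
            · exact ⟨Δ, Or.inr (List.mem_singleton.2 rfl), hx⟩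
          · rintro ⟨cl, hcl, hxcl⟩
            rcases hcl with hcl | hcl
            · exact Or.inl ((hinv.2.1 x).2 ⟨cl, hcl, hxcl⟩)
            · rw [List.mem_singleton.1 hcl] at hxcl
              exact Or.inr hxcl
      obtain ⟨h1, h2, h3⟩ := ihc (st.1 ++ [Δ], st.2 ++ Δ)
        (fun q hq => hc q (List.mem_cons_of_mem _ hq)) hinv'
      rw [hstep]
      refine ⟨h1, ?_, ?_⟩
      · intro x hx
        exact h2 x (List.mem_append.2 (Or.inl hx))
      · intro q hq hqF
        rcases List.mem_cons.1 hq with hqp | hq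
        · rw [hqp]
          refine h2 p (List.mem_append.2 (Or.inr ?_))
          exact (hΔ p).2 ⟨⟨hpinb, hcond.2⟩, Relation.ReflTransGen.refl⟩
        · exact h3 q hq hqF
    · have hstep : pvStepA g st p = st := by
        unfold pvStepA
        rw [if_neg hcond]
      rw [hstep]
      obtain ⟨h1, h2, h3⟩ := ihc st (fun q hq => hc q (List.mem_cons_of_mem _ hq)) hinv
      refine ⟨h1, h2, ?_⟩
      intro q hq hqF
      rcases List.mem_cons.1 hq with hqp | hq
      · have hpF : pvCell g p = "Forest" := by rw [← hqp]; exact hqF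
        have hpc : PySem.Set.contains st.2 p ≠ false := fun h => hcond ⟨h, hpF⟩
        have hpc' : PySem.Set.contains st.2 p = true := by
          cases hb : PySem.Set.contains st.2 p
          · exact absurd hb hpc
          · rfl
        have hpV : p ∈ st.2 := (PySem.Set.contains_iff st.2 p).1 hpc'
        rw [hqp]
        exact h2 p hpV
      · exact h3 q hq hqF

lemma goodFamA (g : List (List String)) : pvGoodFam g (pvScanA g).1 := by
  have h0 : pvInvA g ([], PySem.Set.empty) := by
    refine ⟨by simp, ?_, List.nodup_nil⟩
    intro x
    simp [PySem.Set.empty]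
  obtain ⟨hinv, _, hall⟩ := scanA_fold g (pvCells g) ([], PySem.Set.empty)
    (fun p hp => (mem_cells g p).1 hp) h0
  rw [scanA_eq]
  exact ⟨hinv.1, fun x hx =>
    (hinv.2.1 x).1 (hall x ((mem_cells g x).2 hx.1) hx.2)⟩

def pvRP (g : List (List String)) (P : List (Int × Int)) : (Int × Int) → (Int × Int) → Prop :=
  Relation.ReflTransGen (fun a b => pvStepT g "Forest" a b ∧ a ∈ P ∧ b ∈ P)

def pvRE (g : List (List String)) (P : List (Int × Int)) (p : Int × Int) (ns : List (Int × Int)) :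
    (Int × Int) → (Int × Int) → Prop :=
  Relation.ReflTransGen (fun a b => (pvStepT g "Forest" a b ∧ a ∈ P ∧ b ∈ P) ∨
    (pvStepT g "Forest" a b ∧ ((a = p ∧ b ∈ ns) ∨ (b = p ∧ a ∈ ns))))

lemma rtg_congr {α : Type} {r s : α → α → Prop} (h : ∀ a b, r a b ↔ s a b) {x y : α} :
    Relation.ReflTransGen r x y ↔ Relation.ReflTransGen s x y :=
  ⟨Relation.ReflTransGen.mono (fun a b => (h a b).1),
   Relation.ReflTransGen.mono (fun a b => (h a b).2)⟩

lemma pvRE_symm {g : List (List String)} {P : List (Int × Int)} {p : Int × Int}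
    {ns : List (Int × Int)} {x y : Int × Int} (h : pvRE g P p ns x y) : pvRE g P p ns y x := by
  refine Relation.ReflTransGen.symmetric ?_ h
  rintro a b (⟨hst, ha, hb⟩ | ⟨hst, hc⟩)
  · exact Or.inl ⟨stepT_symm g "Forest" hst, hb, ha⟩
  · refine Or.inr ⟨stepT_symm g "Forest" hst, ?_⟩
    rcases hc with ⟨h1, h2⟩ | ⟨h1, h2⟩
    · exact Or.inr ⟨h1, h2⟩
    · exact Or.inl ⟨h1, h2⟩

lemma pvRP_symm {g : List (List String)} {P : List (Int × Int)} {x y : Int × Int}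
    (h : pvRP g P x y) : pvRP g P y x := by
  refine Relation.ReflTransGen.symmetric ?_ h
  rintro a b ⟨hst, ha, hb⟩
  exact ⟨stepT_symm g "Forest" hst, hb, ha⟩

lemma re_empty {g : List (List String)} {P : List (Int × Int)} {p : Int × Int} {x y : Int × Int} :
    pvRE g P p [] x y ↔ pvRP g P x y := by
  refine rtg_congr ?_
  intro a b
  constructor
  · rintro (h | ⟨_, (⟨_, h⟩ | ⟨_, h⟩)⟩)
    · exact h
    · cases h
    · cases h
  · exact fun h => Or.inl h

lemma re_snoc_none {g : List (List String)} {P : List (Int × Int)} {p nb : Int × Int}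
    {ns : List (Int × Int)} (h : ¬ pvStepT g "Forest" p nb) {x y : Int × Int} :
    pvRE g P p (ns ++ [nb]) x y ↔ pvRE g P p ns x y := by
  refine rtg_congr ?_
  intro a b
  constructor
  · rintro (hold | ⟨hst, (⟨ha, hb⟩ | ⟨hb, ha⟩)⟩)
    · exact Or.inl hold
    · rcases List.mem_append.1 hb with hb | hb
      · exact Or.inr ⟨hst, Or.inl ⟨ha, hb⟩⟩
      · rw [List.mem_singleton.1 hb] at hst
        rw [ha] at hst
        exact absurd hst h
    · rcases List.mem_append.1 ha with ha | ha
      · exact Or.inr ⟨hst, Or.inr ⟨hb, ha⟩⟩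
      · rw [List.mem_singleton.1 ha] at hst
        rw [hb] at hst
        exact absurd (stepT_symm g "Forest" hst) h
  · rintro (hold | ⟨hst, (⟨ha, hb⟩ | ⟨hb, ha⟩)⟩)
    · exact Or.inl hold
    · exact Or.inr ⟨hst, Or.inl ⟨ha, List.mem_append.2 (Or.inl hb)⟩⟩
    · exact Or.inr ⟨hst, Or.inr ⟨hb, List.mem_append.2 (Or.inl ha)⟩⟩

lemma re_snoc {g : List (List String)} {P : List (Int × Int)} {p nb : Int × Int}
    {ns : List (Int × Int)} (hstep : pvStepT g "Forest" p nb) {x y : Int × Int} :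
    pvRE g P p (ns ++ [nb]) x y ↔
      pvRE g P p ns x y ∨ (pvRE g P p ns x p ∧ pvRE g P p ns nb y) ∨
      (pvRE g P p ns x nb ∧ pvRE g P p ns p y) := by
  constructor
  · intro h
    induction h using Relation.ReflTransGen.head_induction_on with
    | refl => exact Or.inl Relation.ReflTransGen.refl
    | head h' hrest ihm =>
      rename_i a c
      rcases h' with hold | ⟨hst, hcase⟩
      · have hac : pvRE g P p ns a c := Relation.ReflTransGen.single (Or.inl hold)
        rcases ihm with h1 | ⟨h2a, h2b⟩ | ⟨h3a, h3b⟩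
        · exact Or.inl (hac.trans h1)
        · exact Or.inr (Or.inl ⟨hac.trans h2a, h2b⟩)
        · exact Or.inr (Or.inr ⟨hac.trans h3a, h3b⟩)
      · rcases hcase with ⟨hap, hcmem⟩ | ⟨hcp, hamem⟩
        · rcases List.mem_append.1 hcmem with hcns | hcnb
          · -- still an ns-edge
            have hac : pvRE g P p ns a c :=
              Relation.ReflTransGen.single (Or.inr ⟨hst, Or.inl ⟨hap, hcns⟩⟩)
            rcases ihm with h1 | ⟨h2a, h2b⟩ | ⟨h3a, h3b⟩
            · exact Or.inl (hac.trans h1)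
            · exact Or.inr (Or.inl ⟨hac.trans h2a, h2b⟩)
            · exact Or.inr (Or.inr ⟨hac.trans h3a, h3b⟩)
          · -- new edge a = p, c = nb
            have hcnb' : c = nb := List.mem_singleton.1 hcnb
            rw [hcnb'] at ihm
            rw [hap]
            rcases ihm with h1 | ⟨h2a, h2b⟩ | ⟨h3a, h3b⟩
            · exact Or.inr (Or.inl ⟨Relation.ReflTransGen.refl, h1⟩)
            · exact Or.inr (Or.inl ⟨Relation.ReflTransGen.refl, h2b⟩)
            · exact Or.inl h3b
        · rcases List.mem_append.1 hamem with hans | hanb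
          · -- still an ns-edge
            have hac : pvRE g P p ns a c :=
              Relation.ReflTransGen.single (Or.inr ⟨hst, Or.inr ⟨hcp, hans⟩⟩)
            rcases ihm with h1 | ⟨h2a, h2b⟩ | ⟨h3a, h3b⟩
            · exact Or.inl (hac.trans h1)
            · exact Or.inr (Or.inl ⟨hac.trans h2a, h2b⟩)
            · exact Or.inr (Or.inr ⟨hac.trans h3a, h3b⟩)
          · -- new edge c = p, a = nb
            have hanb' : a = nb := List.mem_singleton.1 hanb
            rw [hcp] at ihm
            rw [hanb']
            rcases ihm with h1 | ⟨h2a, h2b⟩ | ⟨h3a, h3b⟩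
            · exact Or.inr (Or.inr ⟨Relation.ReflTransGen.refl, h1⟩)
            · exact Or.inl h2b
            · exact Or.inr (Or.inr ⟨Relation.ReflTransGen.refl, h3b⟩)
  · have hmono : ∀ {u v : Int × Int}, pvRE g P p ns u v → pvRE g P p (ns ++ [nb]) u v := by
      intro u v h
      refine Relation.ReflTransGen.mono ?_ h
      rintro a b (hold | ⟨hst, (⟨ha, hb⟩ | ⟨hb, ha⟩)⟩)
      · exact Or.inl hold
      · exact Or.inr ⟨hst, Or.inl ⟨ha, List.mem_append.2 (Or.inl hb)⟩⟩
      · exact Or.inr ⟨hst, Or.inr ⟨hb, List.mem_append.2 (Or.inl ha)⟩⟩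
    have hedge : pvRE g P p (ns ++ [nb]) p nb :=
      Relation.ReflTransGen.single
        (Or.inr ⟨hstep, Or.inl ⟨rfl, List.mem_append.2 (Or.inr (List.mem_singleton.2 rfl))⟩⟩)
    rintro (h1 | ⟨h2a, h2b⟩ | ⟨h3a, h3b⟩)
    · exact hmono h1
    · exact ((hmono h2a).trans hedge).trans (hmono h2b)
    · exact ((hmono h3a).trans (pvRE_symm hedge)).trans (hmono h3b)

lemma nbrs_ne {p q : Int × Int} (h : q ∈ pvNbrs p) : q ≠ p := by
  simp only [pvNbrs, List.mem_cons, List.not_mem_nil, or_false, Prod.ext_iff] at h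
  intro heq
  subst heq
  rcases h with ⟨h1, _⟩ | ⟨h1, _⟩ | ⟨_, h2⟩ | ⟨_, h2⟩ <;> omega

lemma nbrs_lex_cases {p q : Int × Int} (hq : q ∈ pvNbrs p) (hlex : pvLex q p) :
    q = (p.1 - 1, p.2) ∨ q = (p.1, p.2 - 1) := by
  simp only [pvNbrs, List.mem_cons, List.not_mem_nil, or_false] at hq
  rcases hq with rfl | rfl | rfl | rfl
  · exact absurd hlex (by simp [pvLex])
  · exact Or.inl rfl
  · exact absurd hlex (by simp [pvLex])
  · exact Or.inr rfl

lemma nbrs_lex_up {p : Int × Int} : pvLex (p.1 - 1, p.2) p := Or.inl (by omega)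

lemma nbrs_lex_left {p : Int × Int} : pvLex (p.1, p.2 - 1) p := Or.inr ⟨rfl, by omega⟩

lemma re_full {g : List (List String)} {P : List (Int × Int)} {p : Int × Int}
    (hchar : ∀ q, q ∈ P ↔ (pvInb g q = true ∧ pvLex q p)) {x y : Int × Int} :
    pvRE g P p [(p.1 - 1, p.2), (p.1, p.2 - 1)] x y ↔ pvRP g (P ++ [p]) x y := by
  refine rtg_congr ?_
  intro a b
  constructor
  · rintro (⟨hst, ha, hb⟩ | ⟨hst, (⟨ha, hb⟩ | ⟨hb, ha⟩)⟩)
    · exact ⟨hst, List.mem_append.2 (Or.inl ha), List.mem_append.2 (Or.inl hb)⟩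
    · have hbP : b ∈ P := by
        refine (hchar b).2 ⟨hst.2.1.1, ?_⟩
        rcases List.mem_cons.1 hb with hb | hb
        · rw [hb]; exact nbrs_lex_up
        · rw [List.mem_singleton.1 hb]; exact nbrs_lex_left
      exact ⟨hst, List.mem_append.2 (Or.inr (List.mem_singleton.2 ha)),
        List.mem_append.2 (Or.inl hbP)⟩
    · have haP : a ∈ P := by
        refine (hchar a).2 ⟨hst.1.1, ?_⟩
        rcases List.mem_cons.1 ha with ha | ha
        · rw [ha]; exact nbrs_lex_up
        · rw [List.mem_singleton.1 ha]; exact nbrs_lex_left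
      exact ⟨hst, List.mem_append.2 (Or.inl haP),
        List.mem_append.2 (Or.inr (List.mem_singleton.2 hb))⟩
  · rintro ⟨hst, ha, hb⟩
    rcases List.mem_append.1 ha with ha | ha <;> rcases List.mem_append.1 hb with hb | hb
    · exact Or.inl ⟨hst, ha, hb⟩
    · -- b = p, a ∈ P
      have hbp : b = p := List.mem_singleton.1 hb
      have hmem : a ∈ pvNbrs p := by
        rw [← hbp]
        exact mem_nbrs_symm hst.2.2
      have hlex : pvLex a p := ((hchar a).1 ha).2
      rcases nbrs_lex_cases hmem hlex with h | h
      · exact Or.inr ⟨hst, Or.inr ⟨hbp, by rw [h]; exact List.mem_cons_self⟩⟩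
      · exact Or.inr ⟨hst, Or.inr ⟨hbp, by rw [h]; simp⟩⟩
    · -- a = p, b ∈ P
      have hap : a = p := List.mem_singleton.1 ha
      have hmem : b ∈ pvNbrs p := by
        rw [← hap]
        exact hst.2.2
      have hlex : pvLex b p := ((hchar b).1 hb).2
      rcases nbrs_lex_cases hmem hlex with h | h
      · exact Or.inr ⟨hst, Or.inl ⟨hap, by rw [h]; exact List.mem_cons_self⟩⟩
      · exact Or.inr ⟨hst, Or.inl ⟨hap, by rw [h]; simp⟩⟩
    · -- a = p and b = p : impossible step
      have hap : a = p := List.mem_singleton.1 ha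
      have hbp : b = p := List.mem_singleton.1 hb
      have : b ≠ a := nbrs_ne hst.2.2
      rw [hap, hbp] at this
      exact absurd rfl this

lemma get?_relabel (la lb : Int × Int) (d : PySem.Dict (Int × Int) (Int × Int)) (x : Int × Int) :
    (pvRelabel la lb d).get? x = (d.get? x).map (fun v => if v = la then lb else v) := by
  unfold pvRelabel
  obtain ⟨items⟩ := d
  induction items with
  | nil => simp [PySem.Dict.get?]
  | cons kv rest ih =>
    obtain ⟨k, v⟩ := kv
    simp only [List.map_cons, PySem.Dict.get?_mk_cons]
    split
    · simp
    · exact ih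

lemma keys_relabel (la lb : Int × Int) (d : PySem.Dict (Int × Int) (Int × Int)) :
    (pvRelabel la lb d).keys = d.keys := by
  unfold pvRelabel
  obtain ⟨items⟩ := d
  simp [List.map_map, PySem.Dict.keys]

def pvMerge (p : Int × Int) (lab2 : PySem.Dict (Int × Int) (Int × Int)) (nb : Int × Int) :
    PySem.Dict (Int × Int) (Int × Int) :=
  match lab2.get? nb with
  | some la =>
      let lb := lab2.getD p p
      if la ≠ lb then pvRelabel la lb lab2 else lab2
  | none => lab2

lemma procNb {g : List (List String)} {P : List (Int × Int)} {p nb : Int × Int}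
    {ns : List (Int × Int)} {lab : PySem.Dict (Int × Int) (Int × Int)}
    (hkn : lab.keys.Nodup)
    (hK : ∀ x, lab.contains x = true ↔ (x = p ∨ (pvTc g "Forest" x ∧ x ∈ P)))
    (hroot : ∀ x l, lab.get? x = some l → lab.get? l = some l)
    (hek : ∀ x y lx ly, lab.get? x = some lx → lab.get? y = some ly →
      (lx = ly ↔ pvRE g P p ns x y))
    (hTp : pvTc g "Forest" p)
    (hnbmem : nb ∈ pvNbrs p)
    (hnbP : pvTc g "Forest" nb → nb ∈ P) :
    (pvMerge p lab nb).keys.Nodup ∧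
    (∀ x, (pvMerge p lab nb).contains x = true ↔ (x = p ∨ (pvTc g "Forest" x ∧ x ∈ P))) ∧
    (∀ x l, (pvMerge p lab nb).get? x = some l → (pvMerge p lab nb).get? l = some l) ∧
    (∀ x y lx ly, (pvMerge p lab nb).get? x = some lx → (pvMerge p lab nb).get? y = some ly →
      (lx = ly ↔ pvRE g P p (ns ++ [nb]) x y)) := by
  cases hg : lab.get? nb with
  | none =>
    have hlab2 : pvMerge p lab nb = lab := by simp [pvMerge, hg]
    rw [hlab2]
    have hnT : ¬ pvStepT g "Forest" p nb := by
      intro hst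
      have hc : lab.contains nb = true := (hK nb).2 (Or.inr ⟨hst.2.1, hnbP hst.2.1⟩)
      rw [PySem.Dict.contains_eq_isSome_get?, hg] at hc
      cases hc
    exact ⟨hkn, hK, hroot, fun x y lx ly h1 h2 =>
      (hek x y lx ly h1 h2).trans (re_snoc_none hnT).symm⟩
  | some la =>
    have hpc : lab.contains p = true := (hK p).2 (Or.inl rfl)
    rw [PySem.Dict.contains_eq_isSome_get?] at hpc
    obtain ⟨lb, hgp⟩ := Option.isSome_iff_exists.1 hpc
    have hgetD : lab.getD p p = lb := by
      rw [PySem.Dict.getD_eq_get?_getD, hgp]; rfl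
    have hnbne : nb ≠ p := nbrs_ne hnbmem
    have hTnb : pvTc g "Forest" nb ∧ nb ∈ P := by
      have hc : lab.contains nb = true := by
        rw [PySem.Dict.contains_eq_isSome_get?, hg]; rfl
      rcases (hK nb).1 hc with h | h
      · exact absurd h hnbne
      · exact h
    have hstep : pvStepT g "Forest" p nb := ⟨hTp, hTnb.1, hnbmem⟩
    have hrootlb : lab.get? lb = some lb := hroot _ _ hgp
    have hlanb : ∀ z lz, lab.get? z = some lz → (lz = la ↔ pvRE g P p ns z nb) :=
      fun z lz hz => hek z nb lz la hz hg
    have hlbp : ∀ z lz, lab.get? z = some lz → (lz = lb ↔ pvRE g P p ns z p) :=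
      fun z lz hz => hek z p lz lb hz hgp
    by_cases hne : la = lb
    · have hlab2 : pvMerge p lab nb = lab := by
        simp only [pvMerge, hg, hgetD]
        rw [if_neg (not_not_intro hne)]
      rw [hlab2]
      have hREnbp : pvRE g P p ns nb p := (hek nb p la lb hg hgp).1 hne
      refine ⟨hkn, hK, hroot, fun x y lx ly h1 h2 => ?_⟩
      rw [hek x y lx ly h1 h2, re_snoc hstep]
      constructor
      · exact Or.inl
      · rintro (h | ⟨h2a, h2b⟩ | ⟨h3a, h3b⟩)
        · exact h
        · exact (h2a.trans (pvRE_symm hREnbp)).trans h2b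
        · exact (h3a.trans hREnbp).trans h3b
    · have hlab2 : pvMerge p lab nb = pvRelabel la lb lab := by
        simp only [pvMerge, hg, hgetD]
        rw [if_pos hne]
      rw [hlab2]
      have hget2 : ∀ x, (pvRelabel la lb lab).get? x =
          (lab.get? x).map (fun v => if v = la then lb else v) := get?_relabel la lb lab
      have hcont2 : ∀ x, (pvRelabel la lb lab).contains x = lab.contains x := by
        intro x
        rw [PySem.Dict.contains_eq_isSome_get?, PySem.Dict.contains_eq_isSome_get?, hget2]
        cases lab.get? x <;> rfl
      refine ⟨by rw [keys_relabel]; exact hkn, fun x => by rw [hcont2]; exact hK x, ?_, ?_⟩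
      · intro x l hx
        rw [hget2] at hx
        cases hlx : lab.get? x with
        | none => rw [hlx] at hx; cases hx
        | some lx =>
          rw [hlx] at hx
          simp only [Option.map_some] at hx
          have hrootlx : lab.get? lx = some lx := hroot _ _ hlx
          by_cases hcase : lx = la
          · rw [if_pos hcase] at hx
            have hl : l = lb := (Option.some_inj.1 hx).symm
            rw [hget2, hl, hrootlb]
            simp only [Option.map_some]
            rw [if_neg (fun h => hne h.symm)]
          · rw [if_neg hcase] at hx
            have hl : l = lx := (Option.some_inj.1 hx).symm
            rw [hget2, hl, hrootlx]
            simp only [Option.map_some]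
            rw [if_neg hcase]
      · intro x y lx' ly' h1 h2
        rw [hget2] at h1 h2
        cases hlx : lab.get? x with
        | none => rw [hlx] at h1; cases h1
        | some lx =>
        cases hly : lab.get? y with
        | none => rw [hly] at h2; cases h2
        | some ly =>
          rw [hlx] at h1; rw [hly] at h2
          simp only [Option.map_some, Option.some_inj] at h1 h2
          subst h1; subst h2
          rw [re_snoc hstep]
          have hxy := hek x y lx ly hlx hly
          have hxla := hlanb x lx hlx
          have hyla := hlanb y ly hly
          have hxlb := hlbp x lx hlx
          have hylb := hlbp y ly hly
          by_cases hxa : lx = la <;> by_cases hya : ly = la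
          · simp only [if_pos hxa, if_pos hya]
            exact iff_of_true trivial (Or.inl (hxy.1 (hxa.trans hya.symm)))
          · simp only [if_pos hxa, if_neg hya]
            constructor
            · intro h
              exact Or.inr (Or.inr ⟨hxla.1 hxa, pvRE_symm (hylb.1 h.symm)⟩)
            · rintro (h | ⟨ha1, ha2⟩ | ⟨ha1, ha2⟩)
              · have hxyeq := hxy.2 h
                rw [hxa] at hxyeq
                exact absurd hxyeq.symm hya
              · have hl := hxlb.2 ha1
                rw [hxa] at hl
                exact absurd hl hne
              · exact (hylb.2 (pvRE_symm ha2)).symm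
          · simp only [if_neg hxa, if_pos hya]
            constructor
            · intro h
              exact Or.inr (Or.inl ⟨hxlb.1 h, pvRE_symm (hyla.1 hya)⟩)
            · rintro (h | ⟨ha1, ha2⟩ | ⟨ha1, ha2⟩)
              · have hxyeq := hxy.2 h
                rw [hya] at hxyeq
                exact absurd hxyeq hxa
              · exact hxlb.2 ha1
              · exact absurd (hxla.2 ha1) hxa
          · simp only [if_neg hxa, if_neg hya]
            constructor
            · intro h
              exact Or.inl (hxy.1 h)
            · rintro (h | ⟨ha1, ha2⟩ | ⟨ha1, ha2⟩)
              · exact hxy.2 h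
              · exact absurd (hyla.2 (pvRE_symm ha2)) hya
              · exact absurd (hxla.2 ha1) hxa

def pvInvB (g : List (List String)) (P : List (Int × Int))
    (lab : PySem.Dict (Int × Int) (Int × Int)) : Prop :=
  lab.keys.Nodup ∧
  (∀ x, lab.contains x = true ↔ (pvTc g "Forest" x ∧ x ∈ P)) ∧
  (∀ x l, lab.get? x = some l → lab.get? l = some l) ∧
  (∀ x y lx ly, lab.get? x = some lx → lab.get? y = some ly → (lx = ly ↔ pvRP g P x y))

lemma lex_asymm {a b : Int × Int} (h1 : pvLex a b) (h2 : pvLex b a) : False := by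
  rcases h1 with h1 | ⟨h1a, h1b⟩ <;> rcases h2 with h2 | ⟨h2a, h2b⟩ <;> omega

lemma stepB_spec {g : List (List String)} {P : List (Int × Int)} {p : Int × Int}
    {lab : PySem.Dict (Int × Int) (Int × Int)}
    (hchar : ∀ q, q ∈ P ↔ (pvInb g q = true ∧ pvLex q p))
    (hpinb : pvInb g p = true)
    (hinv : pvInvB g P lab) :
    pvInvB g (P ++ [p]) (pvStepB g lab p) := by
  obtain ⟨hkn, hK, hroot, hek⟩ := hinv
  have hpP : p ∉ P := fun h => lex_asymm ((hchar p).1 h).2 ((hchar p).1 h).2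
  by_cases hF : pvCell g p = "Forest"
  case neg =>
    have hstep : pvStepB g lab p = lab := by simp [pvStepB, hF]
    rw [hstep]
    have hTp : ¬ pvTc g "Forest" p := fun h => hF h.2
    refine ⟨hkn, ?_, hroot, ?_⟩
    · intro x
      rw [hK x]
      constructor
      · rintro ⟨hT, hx⟩; exact ⟨hT, List.mem_append.2 (Or.inl hx)⟩
      · rintro ⟨hT, hx⟩
        rcases List.mem_append.1 hx with hx | hx
        · exact ⟨hT, hx⟩
        · rw [List.mem_singleton.1 hx] at hT; exact absurd hT hTp
    · intro x y lx ly h1 h2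
      rw [hek x y lx ly h1 h2]
      refine rtg_congr ?_
      intro a b
      constructor
      · rintro ⟨hst, ha, hb⟩
        exact ⟨hst, List.mem_append.2 (Or.inl ha), List.mem_append.2 (Or.inl hb)⟩
      · rintro ⟨hst, ha, hb⟩
        rcases List.mem_append.1 ha with ha | ha
        · rcases List.mem_append.1 hb with hb | hb
          · exact ⟨hst, ha, hb⟩
          · rw [List.mem_singleton.1 hb] at hst; exact absurd hst.2.1 hTp
        · rw [List.mem_singleton.1 ha] at hst; exact absurd hst.1 hTp
  case pos =>
    have hTp : pvTc g "Forest" p := ⟨hpinb, hF⟩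
    have hg1 : ∀ x, (lab.insert p p).get? x = if x = p then some p else lab.get? x :=
      fun x => PySem.Dict.get?_insert lab p x p
    have hkn1 : (lab.insert p p).keys.Nodup := PySem.Dict.nodup_keys_insert lab p p hkn
    have hkeyP : ∀ x l, lab.get? x = some l → x ∈ P := by
      intro x l hx
      exact ((hK x).1 (by rw [PySem.Dict.contains_eq_isSome_get?, hx]; rfl)).2
    have hvalP : ∀ x l, lab.get? x = some l → l ≠ p := by
      intro x l hx h
      exact hpP (h ▸ hkeyP l l (hroot _ _ hx))
    have hK1 : ∀ x, (lab.insert p p).contains x = true ↔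
        (x = p ∨ (pvTc g "Forest" x ∧ x ∈ P)) := by
      intro x
      rw [PySem.Dict.contains_eq_isSome_get?, hg1]
      split
      · rename_i h; simp [h]
      · rename_i h
        rw [← PySem.Dict.contains_eq_isSome_get?, hK x]
        simp [h]
    have hroot1 : ∀ x l, (lab.insert p p).get? x = some l → (lab.insert p p).get? l = some l := by
      intro x l hx
      rw [hg1] at hx
      split at hx
      · have hl : l = p := (Option.some_inj.1 hx).symm
        rw [hg1, hl, if_pos rfl]
      · have hl := hroot _ _ hx
        have hlp : l ≠ p := hvalP _ _ hx
        rw [hg1, if_neg hlp, hl]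
    have hek1 : ∀ x y lx ly, (lab.insert p p).get? x = some lx →
        (lab.insert p p).get? y = some ly → (lx = ly ↔ pvRE g P p [] x y) := by
      intro x y lx ly h1 h2
      rw [hg1] at h1
      rw [hg1] at h2
      rw [re_empty]
      have hnoRP : ∀ w, pvRP g P p w → p = w := by
        intro w hr
        rcases hr.cases_head with h | ⟨c, hc, _⟩
        · exact h
        · exact absurd hc.2.1 hpP
      split at h1 <;> split at h2
      · rename_i hxp hyp
        have hlx : lx = p := (Option.some_inj.1 h1).symm
        have hly : ly = p := (Option.some_inj.1 h2).symm
        rw [hxp, hyp, hlx, hly]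
        exact iff_of_true rfl Relation.ReflTransGen.refl
      · rename_i hxp hyp
        have hlx : lx = p := (Option.some_inj.1 h1).symm
        have hlyp : ly ≠ p := hvalP _ _ h2
        rw [hxp, hlx]
        constructor
        · intro h; exact absurd h.symm hlyp
        · intro h
          have hyP : y ∈ P := hkeyP _ _ h2
          exact absurd (hnoRP y h ▸ hyP) hpP
      · rename_i hxp hyp
        have hly : ly = p := (Option.some_inj.1 h2).symm
        have hlxp : lx ≠ p := hvalP _ _ h1
        rw [hyp, hly]
        constructor
        · intro h; exact absurd h hlxp
        · intro h
          have hxP : x ∈ P := hkeyP _ _ h1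
          exact absurd (hnoRP x (pvRP_symm h) ▸ hxP) hpP
      · exact hek x y lx ly h1 h2
    have hfold : pvStepB g lab p =
        pvMerge p (pvMerge p (lab.insert p p) (p.1 - 1, p.2)) (p.1, p.2 - 1) := by
      simp only [pvStepB, if_pos hF]
      rfl
    obtain ⟨hkn2, hK2, hroot2, hek2⟩ := procNb (ns := []) hkn1 hK1 hroot1 hek1 hTp
      (by simp [pvNbrs]) (fun hT => (hchar _).2 ⟨hT.1, nbrs_lex_up⟩)
    obtain ⟨hkn3, hK3, hroot3, hek3⟩ := procNb (ns := [(p.1 - 1, p.2)]) hkn2 hK2 hroot2 hek2 hTp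
      (by simp [pvNbrs]) (fun hT => (hchar _).2 ⟨hT.1, nbrs_lex_left⟩)
    rw [hfold]
    refine ⟨hkn3, ?_, hroot3, ?_⟩
    · intro x
      rw [hK3 x]
      constructor
      · rintro (rfl | ⟨hT, hx⟩)
        · exact ⟨hTp, List.mem_append.2 (Or.inr (List.mem_singleton.2 rfl))⟩
        · exact ⟨hT, List.mem_append.2 (Or.inl hx)⟩
      · rintro ⟨hT, hx⟩
        rcases List.mem_append.1 hx with hx | hx
        · exact Or.inr ⟨hT, hx⟩
        · exact Or.inl (List.mem_singleton.1 hx)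
    · intro x y lx ly h1 h2
      rw [hek3 x y lx ly h1 h2]
      exact re_full hchar

lemma scanB_eq (g : List (List String)) :
    pvScanB g = (pvCells g).foldl (pvStepB g) PySem.Dict.empty := by
  unfold pvScanB pvCells pvStepB
  rw [List.foldl_flatMap]
  simp only [List.foldl_map]

lemma scanB_fold (g : List (List String)) : ∀ (suf P : List (Int × Int)) lab,
    pvCells g = P ++ suf → pvInvB g P lab →
    pvInvB g (pvCells g) (suf.foldl (pvStepB g) lab) := by
  intro suf
  induction suf with
  | nil =>
    intro P lab hsplit hinv
    rw [List.foldl_nil]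
    rw [List.append_nil] at hsplit
    rw [hsplit]
    exact hinv
  | cons p rest ih =>
    intro P lab hsplit hinv
    rw [List.foldl_cons]
    have hpmem : p ∈ pvCells g := by
      rw [hsplit]
      exact List.mem_append.2 (Or.inr List.mem_cons_self)
    have hpinb : pvInb g p = true := (mem_cells g p).1 hpmem
    have hpw := pairwise_lex_cells g
    rw [hsplit] at hpw
    have hchar : ∀ q, q ∈ P ↔ (pvInb g q = true ∧ pvLex q p) := by
      intro q
      constructor
      · intro hq
        refine ⟨(mem_cells g q).1 (by rw [hsplit]; exact List.mem_append.2 (Or.inl hq)), ?_⟩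
        exact (List.pairwise_append.1 hpw).2.2 q hq p List.mem_cons_self
      · rintro ⟨hinb, hlex⟩
        have hq : q ∈ pvCells g := (mem_cells g q).2 hinb
        rw [hsplit] at hq
        rcases List.mem_append.1 hq with h | h
        · exact h
        · rcases List.mem_cons.1 h with hq' | hq'
          · rw [hq'] at hlex
            exact absurd hlex (fun hl => lex_asymm hl hl)
          · have hpq := (List.pairwise_cons.1 (List.pairwise_append.1 hpw).2.1).1 q hq'
            exact absurd hlex (fun hl => lex_asymm hl hpq)
    have hinv' := stepB_spec hchar hpinb hinv
    exact ih (P ++ [p]) _ (by rw [hsplit]; simp) hinv'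

lemma scanB_char (g : List (List String)) : pvInvB g (pvCells g) (pvScanB g) := by
  rw [scanB_eq]
  refine scanB_fold g (pvCells g) [] PySem.Dict.empty (by simp) ?_
  refine ⟨PySem.Dict.nodup_keys_empty, ?_, ?_, ?_⟩
  · intro x
    rw [PySem.Dict.contains_empty]
    simp
  · intro x l h
    rw [PySem.Dict.get?_empty] at h
    cases h
  · intro x y lx ly h
    rw [PySem.Dict.get?_empty] at h
    cases h

lemma rp_cells_iff (g : List (List String)) {x y : Int × Int} :
    pvRP g (pvCells g) x y ↔ pvReachT g "Forest" x y := by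
  refine rtg_congr ?_
  intro a b
  constructor
  · rintro ⟨hst, _, _⟩; exact hst
  · intro hst
    exact ⟨hst, (mem_cells g a).2 hst.1.1, (mem_cells g b).2 hst.2.1.1⟩

def pvGrp (I : List ((Int × Int) × (Int × Int))) (l : Int × Int) : List (Int × Int) :=
  (I.filter (fun kv => kv.2 == l)).map Prod.fst

lemma clusters_get? (I : List ((Int × Int) × (Int × Int))) :
    ∀ l, (I.foldl (fun (cd : PySem.Dict (Int × Int) (List (Int × Int))) kv =>
        cd.insert kv.2 (cd.getD kv.2 [] ++ [kv.1])) PySem.Dict.empty).get? l =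
      if pvGrp I l = [] then none else some (pvGrp I l) := by
  induction I using List.reverseRecOn with
  | nil => simp [pvGrp, PySem.Dict.get?_empty]
  | append_singleton I kv ih =>
    intro l
    rw [List.foldl_append, List.foldl_cons, List.foldl_nil]
    rw [PySem.Dict.get?_insert]
    have hgrp : ∀ m, pvGrp (I ++ [kv]) m =
        pvGrp I m ++ (if kv.2 = m then [kv.1] else []) := by
      intro m
      by_cases h : kv.2 = m <;> simp [pvGrp, List.filter_append, h]
    split
    · rename_i hl
      subst hl
      rw [PySem.Dict.getD_eq_get?_getD, ih kv.2, hgrp kv.2, if_pos rfl]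
      by_cases hemp : pvGrp I kv.2 = []
      · rw [if_pos hemp, hemp]
        simp
      · rw [if_neg hemp]
        have : pvGrp I kv.2 ++ [kv.1] ≠ [] := by simp
        rw [if_neg this]
        rfl
    · rename_i hl
      rw [ih l, hgrp l,
        show ((if kv.2 = l then [kv.1] else []) : List (Int × Int)) = [] from
          if_neg (fun h => hl h.symm),
        List.append_nil]

lemma pvMemValues {κ ν : Type} (d : PySem.Dict κ ν) (v : ν) :
    v ∈ d.values ↔ ∃ k, (k, v) ∈ d.items := by
  rw [PySem.Dict.values.eq_1, List.mem_map]
  constructor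
  · rintro ⟨kv, hkv, rfl⟩
    exact ⟨kv.1, by simpa using hkv⟩
  · rintro ⟨k, hk⟩
    exact ⟨(k, v), hk, rfl⟩

lemma mem_grp {I : List ((Int × Int) × (Int × Int))} {x l : Int × Int} :
    x ∈ pvGrp I l ↔ (x, l) ∈ I := by
  unfold pvGrp
  rw [List.mem_map]
  constructor
  · rintro ⟨kv, hkv, rfl⟩
    rw [List.mem_filter] at hkv
    have h2 : kv.2 = l := by simpa using hkv.2
    have hkveq : kv = (kv.1, l) := Prod.ext_iff.2 ⟨rfl, h2⟩
    rw [← hkveq]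
    exact hkv.1
  · intro h
    exact ⟨(x, l), List.mem_filter.2 ⟨h, by simp⟩, rfl⟩

lemma goodFamB (g : List (List String)) : pvGoodFam g (pvClustersB g).values := by
  obtain ⟨hkn, hK, hroot, hek⟩ := scanB_char g
  have hek' : ∀ x y lx ly, (pvScanB g).get? x = some lx → (pvScanB g).get? y = some ly →
      (lx = ly ↔ pvReachT g "Forest" x y) := by
    intro x y lx ly h1 h2
    rw [hek x y lx ly h1 h2]
    exact rp_cells_iff g
  have hitems : ∀ x l, (pvScanB g).get? x = some l ↔ (x, l) ∈ (pvScanB g).items := by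
    intro x l
    exact PySem.Dict.get?_eq_some_iff_mem_items _ _ _ hkn
  have hTiff : ∀ x, ((pvScanB g).get? x).isSome = true ↔ pvTc g "Forest" x := by
    intro x
    rw [← PySem.Dict.contains_eq_isSome_get?, hK x]
    constructor
    · rintro ⟨h, _⟩; exact h
    · intro h; exact ⟨h, (mem_cells g x).2 h.1⟩
  have hkc : (pvClustersB g).keys.Nodup := by
    unfold pvClustersB
    exact PySem.Dict.nodup_keys_foldl_insert_key _ _ _ _ PySem.Dict.nodup_keys_empty
  have hclget : ∀ l, (pvClustersB g).get? l =
      if pvGrp (pvScanB g).items l = [] then none else some (pvGrp (pvScanB g).items l) := by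
    intro l
    unfold pvClustersB
    exact clusters_get? (pvScanB g).items l
  constructor
  · intro cl hcl
    obtain ⟨k, hk⟩ := (pvMemValues _ cl).1 hcl
    have hgk : (pvClustersB g).get? k = some cl := PySem.Dict.get?_of_mem_items _ hk hkc
    rw [hclget k] at hgk
    by_cases hemp : pvGrp (pvScanB g).items k = []
    · rw [if_pos hemp] at hgk; cases hgk
    · rw [if_neg hemp] at hgk
      have hcleq : cl = pvGrp (pvScanB g).items k := (Option.some_inj.1 hgk).symm
      obtain ⟨x0, hx0⟩ := List.exists_mem_of_ne_nil _ hemp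
      have hx0' : (pvScanB g).get? x0 = some k := (hitems x0 k).2 (mem_grp.1 hx0)
      have hkk : (pvScanB g).get? k = some k := hroot _ _ hx0'
      have hTk : pvTc g "Forest" k := (hTiff k).1 (by rw [hkk]; rfl)
      refine ⟨k, hTk, fun x => ?_⟩
      rw [hcleq, mem_grp, ← hitems]
      constructor
      · intro hx
        have hTx : pvTc g "Forest" x := (hTiff x).1 (by rw [hx]; rfl)
        exact ⟨hTx, reachT_symm ((hek' x k k k hx hkk).1 rfl)⟩
      · rintro ⟨hTx, hr⟩
        obtain ⟨lx, hlx⟩ := Option.isSome_iff_exists.1 ((hTiff x).2 hTx)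
        have hlxk : lx = k := (hek' x k lx k hlx hkk).2 (reachT_symm hr)
        rw [← hlxk]
        exact hlx
  · intro x hTx
    obtain ⟨lx, hlx⟩ := Option.isSome_iff_exists.1 ((hTiff x).2 hTx)
    have hxgrp : x ∈ pvGrp (pvScanB g).items lx := mem_grp.2 ((hitems x lx).1 hlx)
    have hne : pvGrp (pvScanB g).items lx ≠ [] := fun h => by rw [h] at hxgrp; cases hxgrp
    have hget : (pvClustersB g).get? lx = some (pvGrp (pvScanB g).items lx) := by
      rw [hclget lx, if_neg hne]
    have hmemit : (lx, pvGrp (pvScanB g).items lx) ∈ (pvClustersB g).items :=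
      (PySem.Dict.get?_eq_some_iff_mem_items _ _ _ hkc).1 hget
    exact ⟨pvGrp (pvScanB g).items lx, (pvMemValues _ _).2 ⟨lx, hmemit⟩, hxgrp⟩

-- ===== VERDICT (by name: the statement is the Claim_ definition above) =====
theorem stonesideForest_spec : Claim_equal_stonesideForest := by
  intro g _ _
  unfold Spec_stonesideForest
  rw [portA_eq, portB_eq, allm_len_congr g _ _ (goodFamA g) (goodFamB g)]
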